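-- pv_equiv track=rewrite | github.com/learningequality/ka-lite | python-packages/fle_utils/internet/functions.py | generate_all_paths
-- ===== SOURCE A (Python) =====
-- def generate_all_paths(path, base_path="/"):
--     if not base_path.endswith("/"):   # Must have trailing slash to work.
--         base_path += "/"
--
--     if path.endswith("/"):        # Must NOT have trailing slash to work.
--         path = path[0:-1]
--
--     all_paths = []
--     cur_path = base_path[0:-1]
--     for dirname in path[len(base_path) - 1:].split("/"):  # start AFTER the base path
--         cur_path += dirname + "/"
--         all_paths.append(cur_path)
--     return all_paths
-- ===== SOURCE B (Python) =====
-- def generate_all_paths(path, base_path="/"):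
--     if not base_path.endswith("/"):   # Must have trailing slash to work.
--         base_path += "/"
--
--     if path.endswith("/"):            # Must NOT have trailing slash to work.
--         path = path[0:-1]
--
--     prefix = base_path[0:-1]
--     parts = path[len(base_path) - 1:].split("/")
--     return [prefix + "/".join(parts[:i + 1]) + "/" for i in range(len(parts))]
-- ===== Notes on version B (the rewrite author's own statement) =====
-- stated objective: alternative
-- what changed: Replaces A's running cur_path accumulator loop with a per-element comprehension that computes each cumulative path independently by joining the first i+1 split parts onto the base prefix.
import Mathlib
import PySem

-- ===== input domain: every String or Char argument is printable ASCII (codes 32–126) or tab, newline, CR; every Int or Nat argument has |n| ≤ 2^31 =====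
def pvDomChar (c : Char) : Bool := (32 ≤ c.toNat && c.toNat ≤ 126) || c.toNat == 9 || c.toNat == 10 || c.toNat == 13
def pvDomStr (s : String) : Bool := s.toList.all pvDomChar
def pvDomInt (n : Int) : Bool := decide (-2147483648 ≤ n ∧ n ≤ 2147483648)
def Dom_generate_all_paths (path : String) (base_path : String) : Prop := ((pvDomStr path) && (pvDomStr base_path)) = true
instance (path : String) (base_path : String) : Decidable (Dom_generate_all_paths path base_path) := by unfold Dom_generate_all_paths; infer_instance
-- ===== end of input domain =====

-- B replaces A's running-accumulator loop by computing each cumulative path independently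
-- from the split parts (prefix + "/".join(parts[:i+1]) + "/"); objective: alternative decomposition.


-- ===== PORT A =====
def generate_all_paths (path : String) (base_path : String) : List String :=
  let base_path := if PySem.Str.endswith base_path "/" then base_path else base_path ++ "/"
  let path := if PySem.Str.endswith path "/" then PySem.Str.slice path (some 0) (some (-1)) else path
  let st := ((PySem.Str.split? (PySem.Str.slice path (some (PySem.Str.len base_path - 1)) none) "/").getD []).foldl
      (fun (st : List String × String) dirname =>
        let cur := st.2 ++ dirname ++ "/"
        (st.1 ++ [cur], cur))
      ([], PySem.Str.slice base_path (some 0) (some (-1)))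
  st.1

-- ===== PORT B =====
def generate_all_paths_alt (path : String) (base_path : String) : List String :=
  let base_path := if PySem.Str.endswith base_path "/" then base_path else base_path ++ "/"
  let path := if PySem.Str.endswith path "/" then PySem.Str.slice path (some 0) (some (-1)) else path
  let pfx := PySem.Str.slice base_path (some 0) (some (-1))
  let parts := (PySem.Str.split? (PySem.Str.slice path (some (PySem.Str.len base_path - 1)) none) "/").getD []
  (PySem.List.pyRange 0 (PySem.List.len parts) 1).map
    (fun i => pfx ++ PySem.Str.join "/" (PySem.List.slice parts none (some (i + 1))) ++ "/")

-- ===== PRECONDITION & SPEC =====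
def Spec_generate_all_paths (path : String) (base_path : String) (out : List String) : Prop := out = generate_all_paths_alt path base_path
instance (path : String) (base_path : String) (out : List String) : Decidable (Spec_generate_all_paths path base_path out) := by unfold Spec_generate_all_paths; infer_instance

-- ===== CLAIM (what is proved, stated in full; the proofs are below) =====
def Claim_equal_generate_all_paths : Prop := ∀ (path : String) (base_path : String), Dom_generate_all_paths path base_path → Spec_generate_all_paths path base_path (generate_all_paths path base_path)

-- ===== LEMMAS AND PROOFS =====

theorem str_join_singleton (d : String) : PySem.Str.join "/" [d] = d := by
  rw [← String.toList_inj]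
  simp [PySem.Str.toList_join, PySem.Chars.join_singleton]

theorem str_join_cons (d e : String) (l : List String) :
    PySem.Str.join "/" (d :: e :: l) = d ++ "/" ++ PySem.Str.join "/" (e :: l) := by
  rw [← String.toList_inj]
  simp [PySem.Str.toList_join, PySem.Chars.join_cons_cons]

theorem loop_eq (parts : List String) (cur : String) (acc : List String) :
    (parts.foldl
      (fun (st : List String × String) dirname =>
        let c := st.2 ++ dirname ++ "/"
        (st.1 ++ [c], c)) (acc, cur)).1
    = acc ++ (List.range parts.length).map
        (fun k => cur ++ PySem.Str.join "/" (parts.take (k + 1)) ++ "/") := by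
  induction parts generalizing cur acc with
  | nil => simp
  | cons d rest ih =>
      simp only [List.foldl_cons, ih]
      rw [List.length_cons, List.range_succ_eq_map, List.map_cons, List.map_map,
        List.append_assoc, List.singleton_append]
      congr 1
      congr 1
      · simp [str_join_singleton]
      apply List.map_congr_left
      intro k hk
      simp only [List.mem_range] at hk
      simp only [Function.comp_apply, List.take_succ_cons]
      cases ht : rest.take (k + 1) with
      | nil =>
          rcases List.take_eq_nil_iff.mp ht with h | h
          · omega
          · subst h; simp at hk
      | cons x xs =>
          rw [str_join_cons]
          simp [String.append_assoc]

-- ===== VERDICT (by name: the statement is the Claim_ definition above) =====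
theorem generate_all_paths_spec : Claim_equal_generate_all_paths := by
  unfold Claim_equal_generate_all_paths
  intro path base_path _
  unfold Spec_generate_all_paths generate_all_paths generate_all_paths_alt
  simp only [loop_eq, List.nil_append, PySem.List.len_eq, PySem.List.pyRange_one,
    List.map_map, Int.sub_zero, Int.toNat_natCast]
  apply List.map_congr_left
  intro k hk
  simp only [Function.comp_apply, Int.zero_add]
  have h1 : (k : Int) + 1 = ((k + 1 : Nat) : Int) := by push_cast; ring
  rw [h1, PySem.List.slice_to_natCast]
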